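-- pv_equiv track=rewrite | github.com/MrBrantCode/unitest_baseline | mut_generate/mist_train_taco/taco_1716/solution.py | calculate_max_energy_for_first_corridor
-- ===== SOURCE A (Python) =====
-- def calculate_max_energy_for_first_corridor(n, m, corridors):
--     class UnionFind:
--         def __init__(self, n):
--             self.parent = list(range(n))
--
--         def find(self, a):
--             acopy = a
--             while a != self.parent[a]:
--                 a = self.parent[a]
--             while acopy != a:
--                 (self.parent[acopy], acopy) = (a, self.parent[acopy])
--             return a
--
--         def union(self, a, b):
--             self.parent[self.find(b)] = self.find(a)
--
--     # Extract the first corridor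
--     a1, b1, e1 = corridors[0]
--
--     # If there are only two destinations or the number of corridors is exactly one less than the number of destinations
--     if n == 2 or m + 1 == n:
--         return 1000000000
--
--     # Prepare the list of corridors excluding the first one
--     remaining_corridors = corridors[1:]
--
--     # Sort the remaining corridors by energy
--     remaining_corridors.sort(key=lambda x: x[2])
--
--     # Initialize UnionFind
--     uf = UnionFind(n + 1)
--
--     # Initialize the answer with a large value
--     ans = 1000000000
--
--     # Process each corridor in sorted order
--     for aa, bb, cc in remaining_corridors:
--         if uf.find(aa) != uf.find(bb):
--             uf.union(aa, bb)
--         if uf.find(a1) == uf.find(b1):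
--             ans = cc
--             break
--
--     return ans
-- ===== SOURCE B (Python) =====
-- def calculate_max_energy_for_first_corridor(n, m, corridors):
--     a1, b1, e1 = corridors[0]
--     if n == 2 or m + 1 == n:
--         return 1000000000
--     # Kruskal-style scan over the remaining edges, but with a flat component-label
--     # array (comp[v] = label of v's component), merging by relabeling instead of a
--     # path-compressed union-find forest.
--     comp = list(range(n + 1))
--     for aa, bb, cc in sorted(corridors[1:], key=lambda t: t[2]):
--         ca, cb = comp[aa], comp[bb]
--         if ca != cb:
--             comp = [ca if c == cb else c for c in comp]
--         if comp[a1] == comp[b1]: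
--             return cc
--     return 1000000000
-- ===== Notes on version B (the rewrite author's own statement) =====
-- stated objective: simpler
-- what changed: A's mutable path-compressed union-find class (parent forest, two while-loops per find, find/union calls repeated per edge) is replaced by a flat component-label list merged by a one-line relabel comprehension, with the Kruskal scan kept as a plain loop over the sorted remaining edges.
-- outside the precondition, e.g. on calculate_max_energy_for_first_corridor(3, 3, [(1, 2, 7), (1, 2, 5), (99, 99, 9)]): A returns 5, B returns 5; on calculate_max_energy_for_first_corridor(3, 3, [(1, 2, 7), (-1, 2, 5), (1, 2, 6)]): A returns 6, B returns 6
import Mathlib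
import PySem

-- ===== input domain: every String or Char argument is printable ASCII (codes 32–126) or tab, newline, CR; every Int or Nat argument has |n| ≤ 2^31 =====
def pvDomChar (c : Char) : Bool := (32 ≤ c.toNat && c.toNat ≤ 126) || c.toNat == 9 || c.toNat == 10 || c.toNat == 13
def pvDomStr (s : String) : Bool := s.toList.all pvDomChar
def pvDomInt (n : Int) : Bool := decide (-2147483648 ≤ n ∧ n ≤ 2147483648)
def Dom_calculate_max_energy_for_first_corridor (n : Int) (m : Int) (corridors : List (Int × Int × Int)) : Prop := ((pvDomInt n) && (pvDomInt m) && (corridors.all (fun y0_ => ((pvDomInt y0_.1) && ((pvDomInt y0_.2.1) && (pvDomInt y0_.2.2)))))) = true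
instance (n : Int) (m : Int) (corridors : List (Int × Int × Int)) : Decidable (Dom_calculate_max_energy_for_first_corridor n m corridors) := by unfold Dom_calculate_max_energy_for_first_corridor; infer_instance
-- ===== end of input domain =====

-- B replaces A's mutable path-compressed union-find class by a flat component-label
-- list merged by relabeling; same Kruskal scan over the sorted remaining edges (simpler, not faster).

-- ===== PORT A =====
-- UnionFind.find, first while loop: climb to the root (fuel = len(parent)+1, always sufficient on Pre_ inputs)
def pvClimb (p : List Int) (a : Int) : Nat → Int
  | 0 => a
  | f+1 =>
    match PySem.List.pyGet? p a with
    | none => a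
    | some q => if q = a then a else pvClimb p q f

-- UnionFind.find, second while loop: path compression
def pvCompress (p : List Int) (root a : Int) : Nat → List Int
  | 0 => p
  | f+1 =>
    if a = root then p
    else
      match PySem.List.pyGet? p a with
      | none => p
      | some nxt => pvCompress (PySem.List.pySetD p a root) root nxt f

def pvFind (p : List Int) (a : Int) : Int × List Int :=
  let r := pvClimb p a (p.length + 1)
  (r, pvCompress p r a (p.length + 1))

-- self.parent[self.find(b)] = self.find(a)  (Python evaluates the RHS find(a) first)
def pvUnion (p : List Int) (a b : Int) : List Int :=
  let fa := pvFind p a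
  let fb := pvFind fa.2 b
  PySem.List.pySetD fb.2 fb.1 fa.1

def pvLoopA (a1 b1 : Int) : List (Int × Int × Int) → List Int → Int
  | [], _ => 1000000000
  | (aa, bb, cc) :: rest, p =>
    let f1 := pvFind p aa
    let f2 := pvFind f1.2 bb
    let p3 := if f1.1 ≠ f2.1 then pvUnion f2.2 aa bb else f2.2
    let g1 := pvFind p3 a1
    let g2 := pvFind g1.2 b1
    if g1.1 = g2.1 then cc else pvLoopA a1 b1 rest g2.2

def calculate_max_energy_for_first_corridor (n : Int) (m : Int) (corridors : List (Int × Int × Int)) : Int :=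
  match corridors with
  | [] => 0   -- Python raises IndexError on corridors[0]; excluded by Pre_
  | (a1, b1, _e1) :: rest =>
    if n = 2 ∨ m + 1 = n then 1000000000
    else pvLoopA a1 b1 (PySem.List.sorted rest (fun t => t.2.2) false)
           ((List.range (n + 1).toNat).map Int.ofNat)

-- ===== PORT B =====
def pvRelabel (comp : List Int) (ca cb : Int) : List Int :=
  comp.map (fun c => if c = cb then ca else c)

def pvLoopB (a1 b1 : Int) : List (Int × Int × Int) → List Int → Int
  | [], _ => 1000000000
  | (aa, bb, cc) :: rest, comp =>
    let ca := PySem.List.pyGetD comp aa 0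
    let cb := PySem.List.pyGetD comp bb 0
    let comp' := if ca ≠ cb then pvRelabel comp ca cb else comp
    if PySem.List.pyGetD comp' a1 0 = PySem.List.pyGetD comp' b1 0 then cc
    else pvLoopB a1 b1 rest comp'

def calculate_max_energy_for_first_corridor_alt (n : Int) (m : Int) (corridors : List (Int × Int × Int)) : Int :=
  match corridors with
  | [] => 0   -- Python raises IndexError on corridors[0]; excluded by Pre_
  | (a1, b1, _e1) :: rest =>
    if n = 2 ∨ m + 1 = n then 1000000000
    else pvLoopB a1 b1 (PySem.List.sorted rest (fun t => t.2.2) false)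
           ((List.range (n + 1).toNat).map Int.ofNat)

-- ===== PRECONDITION & SPEC =====
-- Pre_ excludes the empty corridor list (A raises IndexError on corridors[0]) and, when the two
-- early guards do not fire and there are edges to process, corridors whose endpoint labels lie
-- outside the natural node range 0..n: there A either raises IndexError (label outside Python's
-- index range, reached before the early break) or silently wraps a negative label around the
-- parent array — an artefact of Python list indexing, not part of the task's domain.
def Pre_calculate_max_energy_for_first_corridor (n : Int) (m : Int) (corridors : List (Int × Int × Int)) : Prop :=
  corridors ≠ [] ∧
    ((n = 2 ∨ m + 1 = n) ∨ corridors.tail = [] ∨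
      (0 ≤ n ∧ ∀ e ∈ corridors, 0 ≤ e.1 ∧ e.1 ≤ n ∧ 0 ≤ e.2.1 ∧ e.2.1 ≤ n))
instance (n : Int) (m : Int) (corridors : List (Int × Int × Int)) : Decidable (Pre_calculate_max_energy_for_first_corridor n m corridors) := by
  unfold Pre_calculate_max_energy_for_first_corridor; infer_instance

def pvWitness_calculate_max_energy_for_first_corridor : Int × Int × (List (Int × Int × Int)) :=
  (5, 3, [(1, 2, 7), (1, 2, 3), (2, 3, 4)])

def Spec_calculate_max_energy_for_first_corridor (n : Int) (m : Int) (corridors : List (Int × Int × Int)) (out : Int) : Prop :=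
  out = calculate_max_energy_for_first_corridor_alt n m corridors
instance (n : Int) (m : Int) (corridors : List (Int × Int × Int)) (out : Int) : Decidable (Spec_calculate_max_energy_for_first_corridor n m corridors out) := by
  unfold Spec_calculate_max_energy_for_first_corridor; infer_instance

-- ===== CLAIM (what is proved, stated in full; the proofs are below) =====
def Claim_equal_calculate_max_energy_for_first_corridor : Prop :=
  ∀ (n : Int) (m : Int) (corridors : List (Int × Int × Int)),
    Dom_calculate_max_energy_for_first_corridor n m corridors →
    Pre_calculate_max_energy_for_first_corridor n m corridors →
    Spec_calculate_max_energy_for_first_corridor n m corridors (calculate_max_energy_for_first_corridor n m corridors)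

-- ===== LEMMAS AND PROOFS =====

-- index in Python range [0, L)
def pvInR (L : Nat) (a : Int) : Prop := 0 ≤ a ∧ a < (L : Int)

-- one parent-pointer step (only meaningful for pvInR indices)
def pvStep (p : List Int) (a : Int) : Int := PySem.List.pyGetD p a a

def pvIter (p : List Int) : Nat → Int → Int
  | 0, a => a
  | k+1, a => pvIter p k (pvStep p a)

def pvIsRoot (p : List Int) (a : Int) : Prop := pvStep p a = a

-- well-formed parent array: pointers stay in range and every node reaches a root within length steps
def pvWF (p : List Int) : Prop :=
  (∀ a : Int, pvInR p.length a → pvInR p.length (pvStep p a)) ∧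
  (∀ a : Int, pvInR p.length a → ∃ k, pvIsRoot p (pvIter p k a))

def pvReach (p : List Int) (a r : Int) : Prop := (∃ k, pvIter p k a = r) ∧ pvIsRoot p r

def pvRootOf (p : List Int) (a : Int) : Int := pvClimb p a (p.length + 1)

def pvCget (comp : List Int) (a : Int) : Int := PySem.List.pyGetD comp a 0

-- the simulation invariant: same partition of [0, L)
def pvSim (p comp : List Int) : Prop :=
  comp.length = p.length ∧ pvWF p ∧
  ∀ a b : Int, pvInR p.length a → pvInR p.length b →
    (pvRootOf p a = pvRootOf p b ↔ pvCget comp a = pvCget comp b)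


-- ---- basic bridges ----
theorem pvGet_eq (p : List Int) (a : Int) (d : Int) (h : pvInR p.length a) :
    PySem.List.pyGet? p a = some (PySem.List.pyGetD p a d) := by
  obtain ⟨h0, h1⟩ := h
  rw [PySem.List.pyGet?_of_nonneg p h0, PySem.List.pyGetD_eq_getElem p d h0 h1]
  have : a.toNat < p.length := by omega
  simp [List.getElem?_eq_getElem this]

theorem pvStep_set (p : List Int) (x v : Int) (hx : pvInR p.length x) (y : Int)
    (hy : pvInR (PySem.List.pySetD p x v).length y) :
    pvStep (PySem.List.pySetD p x v) y = if y = x then v else pvStep p y := by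
  obtain ⟨hx0, hx1⟩ := hx
  rw [PySem.List.length_pySetD] at hy
  obtain ⟨hy0, hy1⟩ := hy
  unfold pvStep
  rw [PySem.List.pySetD_of_nonneg p v hx0]
  have hyl : y.toNat < (p.set x.toNat v).length := by simp; omega
  rw [PySem.List.pyGetD_eq_getElem _ y hy0 (by simpa using hy1)]
  by_cases hxy : y = x
  · subst hxy
    rw [if_pos rfl, List.getElem_set, if_pos (by omega)]
  · rw [if_neg hxy, PySem.List.pyGetD_eq_getElem p y hy0 (by omega)]
    rw [List.getElem_set]
    rw [if_neg (by omega)]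

-- ---- iteration lemmas ----
theorem pvIter_succ (p : List Int) (k : Nat) (a : Int) :
    pvIter p (k+1) a = pvIter p k (pvStep p a) := rfl

theorem pvIter_add (p : List Int) (j k : Nat) (a : Int) :
    pvIter p (j + k) a = pvIter p k (pvIter p j a) := by
  induction j generalizing a with
  | zero => simp [pvIter]
  | succ j ih =>
    rw [show j + 1 + k = (j + k) + 1 from by omega, pvIter_succ, pvIter_succ, ih]

theorem pvRoot_fixed (p : List Int) (r : Int) (hr : pvIsRoot p r) (k : Nat) :
    pvIter p k r = r := by
  induction k with
  | zero => rfl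
  | succ k ih => rw [pvIter_succ, hr]; exact ih

theorem pvReach_unique (p : List Int) (a r s : Int)
    (h1 : pvReach p a r) (h2 : pvReach p a s) : r = s := by
  obtain ⟨⟨k1, hk1⟩, hr1⟩ := h1
  obtain ⟨⟨k2, hk2⟩, hr2⟩ := h2
  rcases Nat.le_total k1 k2 with h | h
  · have := pvIter_add p k1 (k2 - k1) a
    rw [Nat.add_sub_cancel' h] at this
    rw [hk2, hk1] at this
    rw [this, pvRoot_fixed p r hr1]
  · have := pvIter_add p k2 (k1 - k2) a
    rw [Nat.add_sub_cancel' h] at this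
    rw [hk1, hk2] at this
    rw [this, pvRoot_fixed p s hr2]

theorem pvIter_inR (p : List Int) (hcl : ∀ a : Int, pvInR p.length a → pvInR p.length (pvStep p a))
    (k : Nat) (a : Int) (ha : pvInR p.length a) : pvInR p.length (pvIter p k a) := by
  induction k generalizing a with
  | zero => exact ha
  | succ k ih => exact ih (pvStep p a) (hcl a ha)

theorem pvReach_of_step (p : List Int) (a r : Int) (h : pvReach p (pvStep p a) r) : pvReach p a r := by
  obtain ⟨⟨k, hk⟩, hr⟩ := h
  exact ⟨⟨k + 1, by rw [pvIter_succ]; exact hk⟩, hr⟩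

theorem pvReach_self (p : List Int) (a : Int) (h : pvIsRoot p a) : pvReach p a a :=
  ⟨⟨0, rfl⟩, h⟩

-- ---- climb ----
theorem pvClimb_reach (p : List Int)
    (hcl : ∀ a : Int, pvInR p.length a → pvInR p.length (pvStep p a)) :
    ∀ (f : Nat) (a : Int), pvInR p.length a → (∃ k ≤ f, pvIsRoot p (pvIter p k a)) →
      pvReach p a (pvClimb p a f) := by
  intro f
  induction f with
  | zero =>
    intro a ha ⟨k, hk, hroot⟩
    have : k = 0 := by omega
    subst this
    exact pvReach_self p a hroot
  | succ f ih =>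
    intro a ha ⟨k, hk, hroot⟩
    have hget := pvGet_eq p a a ha
    unfold pvClimb
    rw [hget]
    simp only
    by_cases hq : PySem.List.pyGetD p a a = a
    · rw [if_pos hq]
      exact pvReach_self p a hq
    · rw [if_neg hq]
      have hk0 : k ≠ 0 := by
        intro h; subst h; exact hq hroot
      obtain ⟨k', rfl⟩ : ∃ k', k = k' + 1 := ⟨k - 1, by omega⟩
      have hstep : pvInR p.length (pvStep p a) := hcl a ha
      have : pvIsRoot p (pvIter p k' (pvStep p a)) := by
        rw [← pvIter_succ]; exact hroot
      exact pvReach_of_step p a _ (ih (pvStep p a) hstep ⟨k', by omega, this⟩)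

-- pigeonhole: a reachable root is reachable within length steps
theorem pvMinReach (p : List Int)
    (hcl : ∀ a : Int, pvInR p.length a → pvInR p.length (pvStep p a))
    (a : Int) (ha : pvInR p.length a) (hex : ∃ k, pvIsRoot p (pvIter p k a)) :
    ∃ k ≤ p.length, pvIsRoot p (pvIter p k a) := by
  letI hdec : DecidablePred (fun k => pvIsRoot p (pvIter p k a)) := fun k => by
    unfold pvIsRoot; infer_instance
  set K := Nat.find hex with hK
  have hKroot : pvIsRoot p (pvIter p K a) := Nat.find_spec hex
  refine ⟨K, ?_, hKroot⟩
  by_contra hgt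
  rw [Nat.not_le] at hgt
  have hinj : Set.InjOn (fun i => pvIter p i a) (Finset.range K) := by
    intro i hi j hj hij
    simp only [Finset.coe_range, Set.mem_Iio] at hi hj
    change pvIter p i a = pvIter p j a at hij
    change pvIter p i a = pvIter p j a at hij
    by_contra hne
    rcases Nat.lt_or_ge i j with hlt | hge
    · have hper : pvIter p (i + (K - j)) a = pvIter p K a := by
        rw [pvIter_add, hij]
        conv_rhs => rw [show K = j + (K - j) from by omega, pvIter_add]
      have : pvIsRoot p (pvIter p (i + (K - j)) a) := by rw [hper]; exact hKroot
      exact Nat.find_min hex (by omega : i + (K - j) < K) this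
    · have hlt : j < i := by omega
      have hper : pvIter p (j + (K - i)) a = pvIter p K a := by
        rw [pvIter_add, ← hij]
        conv_rhs => rw [show K = i + (K - i) from by omega, pvIter_add]
      have : pvIsRoot p (pvIter p (j + (K - i)) a) := by rw [hper]; exact hKroot
      exact Nat.find_min hex (by omega : j + (K - i) < K) this
  have hmaps : ∀ i ∈ Finset.range K, pvIter p i a ∈ Finset.Ico (0 : Int) (p.length : Int) := by
    intro i _
    have := pvIter_inR p hcl i a ha
    simp only [Finset.mem_Ico]
    exact ⟨this.1, this.2⟩
  have hcard := Finset.card_le_card_of_injOn (fun i => pvIter p i a) hmaps hinj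
  rw [Finset.card_range] at hcard
  have : (Finset.Ico (0 : Int) (p.length : Int)).card = p.length := by
    rw [Int.card_Ico]; omega
  omega

theorem pvRootOf_reach (p : List Int) (a : Int) (hwf : pvWF p) (ha : pvInR p.length a) :
    pvReach p a (pvRootOf p a) := by
  obtain ⟨hcl, hex⟩ := hwf
  obtain ⟨k, hk, hroot⟩ := pvMinReach p hcl a ha (hex a ha)
  exact pvClimb_reach p hcl (p.length + 1) a ha ⟨k, by omega, hroot⟩

theorem pvRootOf_eq_of_reach (p : List Int) (a r : Int) (hwf : pvWF p) (ha : pvInR p.length a)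
    (h : pvReach p a r) : pvRootOf p a = r :=
  pvReach_unique p a _ r (pvRootOf_reach p a hwf ha) h

theorem pvRootOf_inR (p : List Int) (a : Int) (hwf : pvWF p) (ha : pvInR p.length a) :
    pvInR p.length (pvRootOf p a) := by
  obtain ⟨⟨k, hk⟩, _⟩ := pvRootOf_reach p a hwf ha
  rw [← hk]
  exact pvIter_inR p hwf.1 k a ha

theorem pvIsRoot_rootOf (p : List Int) (a : Int) (hwf : pvWF p) (ha : pvInR p.length a) :
    pvIsRoot p (pvRootOf p a) := (pvRootOf_reach p a hwf ha).2

theorem pvRootOf_root (p : List Int) (a : Int) (hwf : pvWF p) (ha : pvInR p.length a)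
    (h : pvIsRoot p a) : pvRootOf p a = a :=
  pvRootOf_eq_of_reach p a a hwf ha (pvReach_self p a h)

theorem pvIsRoot_of_rootOf_self (p : List Int) (a : Int) (hwf : pvWF p) (ha : pvInR p.length a)
    (h : pvRootOf p a = a) : pvIsRoot p a := by
  have := pvIsRoot_rootOf p a hwf ha
  rwa [h] at this

theorem pvRootOf_step (p : List Int) (a : Int) (hwf : pvWF p) (ha : pvInR p.length a) :
    pvRootOf p (pvStep p a) = pvRootOf p a := by
  have hs : pvInR p.length (pvStep p a) := hwf.1 a ha
  by_cases hroot : pvIsRoot p a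
  · rw [hroot]
  · obtain ⟨⟨k, hk⟩, hr⟩ := pvRootOf_reach p a hwf ha
    have hk0 : k ≠ 0 := by
      intro h; subst h
      simp only [pvIter] at hk
      exact hroot (by rw [hk]; exact hr)
    obtain ⟨k', rfl⟩ : ∃ k', k = k' + 1 := ⟨k - 1, by omega⟩
    rw [pvIter_succ] at hk
    exact pvRootOf_eq_of_reach p _ _ hwf hs ⟨⟨k', hk⟩, hr⟩

-- ---- pointer-update lemmas ----
-- path-compression step: redirecting x to its own root changes no root
theorem pvCsetReach (p : List Int) (x r : Int) (hwf : pvWF p) (hx : pvInR p.length x)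
    (hr : pvReach p x r) :
    ∀ (k : Nat) (a s : Int), pvInR p.length a → pvIter p k a = s → pvIsRoot p s →
      ∃ k', pvIter (PySem.List.pySetD p x r) k' a = s ∧
        pvIsRoot (PySem.List.pySetD p x r) s := by
  set q := PySem.List.pySetD p x r with hq
  have hlen : q.length = p.length := PySem.List.length_pySetD p x r
  have hstepq : ∀ y : Int, pvInR p.length y → pvStep q y = if y = x then r else pvStep p y := by
    intro y hy
    exact pvStep_set p x r hx y (by rwa [hlen])
  have hrin : pvInR p.length r := by
    obtain ⟨⟨kk, hkk⟩, _⟩ := hr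
    rw [← hkk]; exact pvIter_inR p hwf.1 kk x hx
  have hrootq : ∀ s : Int, pvInR p.length s → pvIsRoot p s → pvIsRoot q s := by
    intro s hs hroot
    show pvStep q s = s
    rw [hstepq s hs]
    by_cases hsx : s = x
    · subst hsx
      rw [if_pos rfl]
      exact pvReach_unique p s r s hr (pvReach_self p s hroot)
    · rw [if_neg hsx]; exact hroot
  intro k
  induction k with
  | zero =>
    intro a s ha hit hroot
    simp only [pvIter] at hit
    subst hit
    exact ⟨0, rfl, hrootq a ha hroot⟩
  | succ k ih =>
    intro a s ha hit hroot
    have hsin : pvInR p.length s := by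
      rw [← hit]; exact pvIter_inR p hwf.1 (k+1) a ha
    by_cases haroot : pvIsRoot p a
    · have hsa : s = a := by rw [← hit, pvRoot_fixed p a haroot]
      subst hsa
      exact ⟨0, rfl, hrootq s ha hroot⟩
    · by_cases hax : a = x
      · subst hax
        have hs_eq : s = r := pvReach_unique p a s r ⟨⟨k+1, hit⟩, hroot⟩ hr
        subst hs_eq
        refine ⟨1, ?_, hrootq s hsin hroot⟩
        show pvIter q 0 (pvStep q a) = s
        simp only [pvIter]
        rw [hstepq a ha, if_pos rfl]
      · rw [pvIter_succ] at hit
        obtain ⟨k', hit', hroot'⟩ := ih (pvStep p a) s (hwf.1 a ha) hit hroot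
        refine ⟨k' + 1, ?_, hroot'⟩
        rw [pvIter_succ, hstepq a ha, if_neg hax]
        exact hit'

theorem pvCset (p : List Int) (x : Int) (hwf : pvWF p) (hx : pvInR p.length x) :
    (PySem.List.pySetD p x (pvRootOf p x)).length = p.length ∧
    pvWF (PySem.List.pySetD p x (pvRootOf p x)) ∧
    ∀ b : Int, pvInR p.length b →
      pvRootOf (PySem.List.pySetD p x (pvRootOf p x)) b = pvRootOf p b := by
  set r := pvRootOf p x with hrdef
  set q := PySem.List.pySetD p x r with hq
  have hr : pvReach p x r := pvRootOf_reach p x hwf hx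
  have hlen : q.length = p.length := PySem.List.length_pySetD p x r
  have hrin : pvInR p.length r := pvRootOf_inR p x hwf hx
  have hstepq : ∀ y : Int, pvInR p.length y → pvStep q y = if y = x then r else pvStep p y := by
    intro y hy
    exact pvStep_set p x r hx y (by rwa [hlen])
  have hC1 := pvCsetReach p x r hwf hx hr
  have hL1 : 1 ≤ p.length := by obtain ⟨h0, h1⟩ := hx; omega
  have hcl : ∀ a : Int, pvInR q.length a → pvInR q.length (pvStep q a) := by
    intro a ha
    rw [hlen] at ha ⊢
    rw [hstepq a ha]
    by_cases hax : a = x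
    · rw [if_pos hax]; exact hrin
    · rw [if_neg hax]; exact hwf.1 a ha
  have hwfq : pvWF q := by
    refine ⟨hcl, ?_⟩
    intro a ha
    rw [hlen] at ha
    obtain ⟨k, hroot⟩ := hwf.2 a ha
    obtain ⟨k', hit, hroot'⟩ := hC1 k a _ ha rfl hroot
    exact ⟨k', by rw [hit]; exact hroot'⟩
  refine ⟨hlen, hwfq, ?_⟩
  intro b hb
  obtain ⟨⟨k, hk⟩, hroot⟩ := pvRootOf_reach p b hwf hb
  obtain ⟨k', hit, hroot'⟩ := hC1 k b _ hb hk hroot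
  exact pvRootOf_eq_of_reach q b _ hwfq (by rwa [hlen]) ⟨⟨k', hit⟩, hroot'⟩

-- union step: redirecting root rb to root ra merges the two classes
theorem pvUsetReach (p : List Int) (ra rb : Int) (hwf : pvWF p)
    (hrain : pvInR p.length ra) (hra : pvIsRoot p ra)
    (hrbin : pvInR p.length rb) (hrb : pvIsRoot p rb) :
    ∀ (k : Nat) (a s : Int), pvInR p.length a → pvIter p k a = s → pvIsRoot p s →
      ∃ k', pvIter (PySem.List.pySetD p rb ra) k' a = (if s = rb then ra else s) ∧
        pvIsRoot (PySem.List.pySetD p rb ra) (if s = rb then ra else s) := by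
  set q := PySem.List.pySetD p rb ra with hq
  have hlen : q.length = p.length := PySem.List.length_pySetD p rb ra
  have hstepq : ∀ y : Int, pvInR p.length y → pvStep q y = if y = rb then ra else pvStep p y := by
    intro y hy
    exact pvStep_set p rb ra hrbin y (by rwa [hlen])
  have hrootqra : pvIsRoot q ra := by
    show pvStep q ra = ra
    rw [hstepq ra hrain]
    by_cases h : ra = rb
    · rw [if_pos h]
    · rw [if_neg h]; exact hra
  have hrootq : ∀ s : Int, pvInR p.length s → pvIsRoot p s → s ≠ rb → pvIsRoot q s := by
    intro s hs hroot hsb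
    show pvStep q s = s
    rw [hstepq s hs, if_neg hsb]
    exact hroot
  intro k
  induction k with
  | zero =>
    intro a s ha hit hroot
    simp only [pvIter] at hit
    subst hit
    by_cases hab : a = rb
    · subst hab
      rw [if_pos rfl]
      refine ⟨1, ?_, hrootqra⟩
      show pvIter q 0 (pvStep q a) = ra
      simp only [pvIter]
      rw [hstepq a ha, if_pos rfl]
    · rw [if_neg hab]
      exact ⟨0, rfl, hrootq a ha hroot hab⟩
  | succ k ih =>
    intro a s ha hit hroot
    by_cases haroot : pvIsRoot p a
    · have hsa : s = a := by rw [← hit, pvRoot_fixed p a haroot]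
      subst hsa
      exact ih s s ha (by rw [pvRoot_fixed p s haroot]) hroot
    · have hab : a ≠ rb := by
        intro h; subst h; exact haroot hrb
      rw [pvIter_succ] at hit
      obtain ⟨k', hit', hroot'⟩ := ih (pvStep p a) s (hwf.1 a ha) hit hroot
      refine ⟨k' + 1, ?_, hroot'⟩
      rw [pvIter_succ, hstepq a ha, if_neg hab]
      exact hit'

theorem pvUset (p : List Int) (ra rb : Int) (hwf : pvWF p)
    (hrain : pvInR p.length ra) (hra : pvIsRoot p ra)
    (hrbin : pvInR p.length rb) (hrb : pvIsRoot p rb) :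
    (PySem.List.pySetD p rb ra).length = p.length ∧
    pvWF (PySem.List.pySetD p rb ra) ∧
    ∀ b : Int, pvInR p.length b →
      pvRootOf (PySem.List.pySetD p rb ra) b =
        (if pvRootOf p b = rb then ra else pvRootOf p b) := by
  set q := PySem.List.pySetD p rb ra with hq
  have hlen : q.length = p.length := PySem.List.length_pySetD p rb ra
  have hC1 := pvUsetReach p ra rb hwf hrain hra hrbin hrb
  have hL1 : 1 ≤ p.length := by obtain ⟨h0, h1⟩ := hrbin; omega
  have hstepq : ∀ y : Int, pvInR p.length y → pvStep q y = if y = rb then ra else pvStep p y := by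
    intro y hy
    exact pvStep_set p rb ra hrbin y (by rwa [hlen])
  have hcl : ∀ a : Int, pvInR q.length a → pvInR q.length (pvStep q a) := by
    intro a ha
    rw [hlen] at ha ⊢
    rw [hstepq a ha]
    by_cases hab : a = rb
    · rw [if_pos hab]; exact hrain
    · rw [if_neg hab]; exact hwf.1 a ha
  have hwfq : pvWF q := by
    refine ⟨hcl, ?_⟩
    intro a ha
    rw [hlen] at ha
    obtain ⟨k, hroot⟩ := hwf.2 a ha
    obtain ⟨k', hit, hroot'⟩ := hC1 k a _ ha rfl hroot
    exact ⟨k', by rw [hit]; exact hroot'⟩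
  refine ⟨hlen, hwfq, ?_⟩
  intro b hb
  obtain ⟨⟨k, hk⟩, hroot⟩ := pvRootOf_reach p b hwf hb
  obtain ⟨k', hit, hroot'⟩ := hC1 k b _ hb hk hroot
  exact pvRootOf_eq_of_reach q b _ hwfq (by rwa [hlen]) ⟨⟨k', hit⟩, hroot'⟩

-- ---- find / union specifications ----
theorem pvCompress_spec : ∀ (f : Nat) (p : List Int) (a r : Int), pvWF p → pvInR p.length a →
    pvReach p a r →
    (pvCompress p r a f).length = p.length ∧ pvWF (pvCompress p r a f) ∧
    ∀ b : Int, pvInR p.length b → pvRootOf (pvCompress p r a f) b = pvRootOf p b := by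
  intro f
  induction f with
  | zero =>
    intro p a r hwf _ _
    exact ⟨rfl, hwf, fun b _ => rfl⟩
  | succ f ih =>
    intro p a r hwf ha hr
    by_cases har : a = r
    · have heq : pvCompress p r a (f + 1) = p := by
        simp only [pvCompress, if_pos har]
      rw [heq]
      exact ⟨rfl, hwf, fun b _ => rfl⟩
    · have hget := pvGet_eq p a a ha
      have hr_eq : pvRootOf p a = r := pvRootOf_eq_of_reach p a r hwf ha hr
      simp only [pvCompress, if_neg har, hget]
      rw [← hr_eq]
      obtain ⟨hlen1, hwf1, hroots1⟩ := pvCset p a hwf ha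
      set q1 := PySem.List.pySetD p a (pvRootOf p a) with hq1
      have hstepin : pvInR p.length (pvStep p a) := hwf.1 a ha
      have hstepin1 : pvInR q1.length (pvStep p a) := by rwa [hlen1]
      have hq1root : pvRootOf q1 (pvStep p a) = pvRootOf p a := by
        rw [hroots1 (pvStep p a) hstepin, pvRootOf_step p a hwf ha]
      have hreach1 : pvReach q1 (pvStep p a) (pvRootOf p a) := by
        rw [← hq1root]
        exact pvRootOf_reach q1 (pvStep p a) hwf1 hstepin1
      obtain ⟨hlen2, hwf2, hroots2⟩ := ih q1 (pvStep p a) (pvRootOf p a) hwf1 hstepin1 hreach1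
      exact ⟨hlen2.trans hlen1, hwf2,
        fun b hb => (hroots2 b (by rwa [hlen1])).trans (hroots1 b hb)⟩

theorem pvFind_spec (p : List Int) (a : Int) (hwf : pvWF p) (ha : pvInR p.length a) :
    (pvFind p a).1 = pvRootOf p a ∧ (pvFind p a).2.length = p.length ∧ pvWF (pvFind p a).2 ∧
    ∀ b : Int, pvInR p.length b → pvRootOf (pvFind p a).2 b = pvRootOf p b := by
  have h := pvCompress_spec (p.length + 1) p a (pvRootOf p a) hwf ha (pvRootOf_reach p a hwf ha)
  exact ⟨rfl, h.1, h.2.1, h.2.2⟩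

theorem pvUnion_spec (p : List Int) (a b : Int) (hwf : pvWF p) (ha : pvInR p.length a)
    (hb : pvInR p.length b) :
    (pvUnion p a b).length = p.length ∧ pvWF (pvUnion p a b) ∧
    ∀ y : Int, pvInR p.length y →
      pvRootOf (pvUnion p a b) y =
        (if pvRootOf p y = pvRootOf p b then pvRootOf p a else pvRootOf p y) := by
  obtain ⟨hfa1, hfalen, hfawf, hfaroots⟩ := pvFind_spec p a hwf ha
  set p1 := (pvFind p a).2 with hp1
  obtain ⟨hfb1, hfblen, hfbwf, hfbroots⟩ := pvFind_spec p1 b hfawf (by rw [hfalen]; exact hb)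
  set p2 := (pvFind p1 b).2 with hp2
  have hlen2 : p2.length = p.length := by rw [hfblen, hfalen]
  have hroots2 : ∀ y : Int, pvInR p.length y → pvRootOf p2 y = pvRootOf p y := by
    intro y hy
    rw [hfbroots y (by rw [hfalen]; exact hy), hfaroots y hy]
  have hrain : pvInR p.length (pvRootOf p a) := pvRootOf_inR p a hwf ha
  have hrbin : pvInR p.length (pvRootOf p b) := pvRootOf_inR p b hwf hb
  have hra2 : pvIsRoot p2 (pvRootOf p a) := by
    apply pvIsRoot_of_rootOf_self p2 _ hfbwf (by rwa [hlen2])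
    rw [hroots2 _ hrain]
    exact pvRootOf_root p _ hwf hrain (pvIsRoot_rootOf p a hwf ha)
  have hrb2 : pvIsRoot p2 (pvRootOf p b) := by
    apply pvIsRoot_of_rootOf_self p2 _ hfbwf (by rwa [hlen2])
    rw [hroots2 _ hrbin]
    exact pvRootOf_root p _ hwf hrbin (pvIsRoot_rootOf p b hwf hb)
  obtain ⟨hul, huwf, huroots⟩ := pvUset p2 (pvRootOf p a) (pvRootOf p b) hfbwf
    (by rwa [hlen2]) hra2 (by rwa [hlen2]) hrb2
  have hunfold : pvUnion p a b = PySem.List.pySetD p2 (pvRootOf p b) (pvRootOf p a) := by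
    simp only [pvUnion]
    rw [← hp1, ← hp2, hfb1, hfaroots b hb, hfa1]
  refine ⟨by rw [hunfold, hul, hlen2], by rw [hunfold]; exact huwf, ?_⟩
  intro y hy
  rw [hunfold, huroots y (by rwa [hlen2]), hroots2 y hy]

-- ---- component-list side ----
theorem pvCget_relabel (comp : List Int) (ca cb x : Int) (hx : pvInR comp.length x) :
    pvCget (pvRelabel comp ca cb) x = if pvCget comp x = cb then ca else pvCget comp x := by
  obtain ⟨h0, h1⟩ := hx
  unfold pvCget pvRelabel
  rw [PySem.List.pyGetD_eq_getElem _ _ h0 (by simpa using h1),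
      PySem.List.pyGetD_eq_getElem _ _ h0 h1]
  simp [List.getElem_map]

theorem pvMergeIff (ra rb u v : Int) :
    ((if u = rb then ra else u) = (if v = rb then ra else v)) ↔
      (u = v ∨ (u = ra ∧ v = rb) ∨ (u = rb ∧ v = ra)) := by
  split_ifs <;> omega

-- ---- the main loop simulation ----
theorem pvLoop_eq : ∀ (edges : List (Int × Int × Int)) (p comp : List Int) (a1 b1 : Int),
    pvSim p comp → pvInR p.length a1 → pvInR p.length b1 →
    (∀ e ∈ edges, pvInR p.length e.1 ∧ pvInR p.length e.2.1) →
    pvLoopA a1 b1 edges p = pvLoopB a1 b1 edges comp := by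
  intro edges
  induction edges with
  | nil => intro p comp a1 b1 _ _ _ _; rfl
  | cons e rest ih =>
    obtain ⟨aa, bb, cc⟩ := e
    intro p comp a1 b1 hsim ha1 hb1 hed
    obtain ⟨hclen, hwf, hiff⟩ := hsim
    obtain ⟨haa, hbb⟩ := hed (aa, bb, cc) List.mem_cons_self
    obtain ⟨hf1a, hf1len, hf1wf, hf1roots⟩ := pvFind_spec p aa hwf haa
    set p1 := (pvFind p aa).2 with hp1
    obtain ⟨hf2a, hf2len, hf2wf, hf2roots⟩ := pvFind_spec p1 bb hf1wf (by rw [hf1len]; exact hbb)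
    set p2 := (pvFind p1 bb).2 with hp2
    have hlen2 : p2.length = p.length := by rw [hf2len, hf1len]
    have hroots2 : ∀ y : Int, pvInR p.length y → pvRootOf p2 y = pvRootOf p y := by
      intro y hy
      rw [hf2roots y (by rw [hf1len]; exact hy), hf1roots y hy]
    have hrb2 : (pvFind p1 bb).1 = pvRootOf p bb := by rw [hf2a, hf1roots bb hbb]
    simp only [pvLoopA, pvLoopB, ← hp1, ← hp2, hf1a, hrb2]
    have hcont : ∀ (p3 comp' : List Int), p3.length = p.length → comp'.length = p.length →
        pvWF p3 →
        (∀ x y : Int, pvInR p.length x → pvInR p.length y →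
          (pvRootOf p3 x = pvRootOf p3 y ↔ pvCget comp' x = pvCget comp' y)) →
        (if (pvFind p3 a1).1 = (pvFind (pvFind p3 a1).2 b1).1 then cc
          else pvLoopA a1 b1 rest (pvFind (pvFind p3 a1).2 b1).2) =
        (if pvCget comp' a1 = pvCget comp' b1 then cc else pvLoopB a1 b1 rest comp') := by
      intro p3 comp' h3len hclen' h3wf h3iff
      obtain ⟨hg1a, hg1len, hg1wf, hg1roots⟩ := pvFind_spec p3 a1 h3wf (by rw [h3len]; exact ha1)
      set p4 := (pvFind p3 a1).2 with hp4
      obtain ⟨hg2a, hg2len, hg2wf, hg2roots⟩ :=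
        pvFind_spec p4 b1 hg1wf (by rw [hg1len, h3len]; exact hb1)
      set p5 := (pvFind p4 b1).2 with hp5
      have hlen5 : p5.length = p.length := by rw [hg2len, hg1len, h3len]
      have hroots5 : ∀ y : Int, pvInR p.length y → pvRootOf p5 y = pvRootOf p3 y := by
        intro y hy
        rw [hg2roots y (by rw [hg1len, h3len]; exact hy), hg1roots y (by rw [h3len]; exact hy)]
      have htest : ((pvFind p3 a1).1 = (pvFind p4 b1).1) ↔
          (pvCget comp' a1 = pvCget comp' b1) := by
        rw [hg1a, hg2a, hg1roots b1 (by rw [h3len]; exact hb1)]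
        exact h3iff a1 b1 ha1 hb1
      by_cases htc : pvCget comp' a1 = pvCget comp' b1
      · rw [if_pos (htest.mpr htc), if_pos htc]
      · rw [if_neg (fun h => htc (htest.mp h)), if_neg htc]
        apply ih p5 comp' a1 b1 ?_ (by rwa [hlen5]) (by rwa [hlen5])
        · intro e he
          obtain ⟨h1, h2⟩ := hed e (List.mem_cons_of_mem _ he)
          exact ⟨by rwa [hlen5], by rwa [hlen5]⟩
        · refine ⟨by rw [hclen', hlen5], hg2wf, ?_⟩
          intro x y hx hy
          rw [hlen5] at hx hy
          rw [hroots5 x hx, hroots5 y hy]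
          exact h3iff x y hx hy
    by_cases hc : pvCget comp aa = pvCget comp bb
    · have hceq : pvRootOf p aa = pvRootOf p bb := (hiff aa bb haa hbb).mpr hc
      have hA : (if pvRootOf p aa ≠ pvRootOf p bb then pvUnion p2 aa bb else p2) = p2 :=
        if_neg (fun h => h hceq)
      have hB : (if PySem.List.pyGetD comp aa 0 ≠ PySem.List.pyGetD comp bb 0 then
          pvRelabel comp (PySem.List.pyGetD comp aa 0) (PySem.List.pyGetD comp bb 0)
          else comp) = comp := if_neg (fun h => h hc)
      rw [hA, hB]
      exact hcont p2 comp hlen2 (by rw [hclen]) hf2wf (fun x y hx hy => by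
        rw [hroots2 x hx, hroots2 y hy]; exact hiff x y hx hy)
    · have hcne : pvRootOf p aa ≠ pvRootOf p bb := fun h => hc ((hiff aa bb haa hbb).mp h)
      have hA : (if pvRootOf p aa ≠ pvRootOf p bb then pvUnion p2 aa bb else p2) =
          pvUnion p2 aa bb := if_pos hcne
      have hB : (if PySem.List.pyGetD comp aa 0 ≠ PySem.List.pyGetD comp bb 0 then
          pvRelabel comp (PySem.List.pyGetD comp aa 0) (PySem.List.pyGetD comp bb 0)
          else comp) =
          pvRelabel comp (PySem.List.pyGetD comp aa 0) (PySem.List.pyGetD comp bb 0) :=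
        if_pos hc
      rw [hA, hB]
      obtain ⟨hulen, huwf, huroots⟩ := pvUnion_spec p2 aa bb hf2wf (by rwa [hlen2]) (by rwa [hlen2])
      have huroots' : ∀ y : Int, pvInR p.length y →
          pvRootOf (pvUnion p2 aa bb) y =
            (if pvRootOf p y = pvRootOf p bb then pvRootOf p aa else pvRootOf p y) := by
        intro y hy
        rw [huroots y (by rwa [hlen2]), hroots2 y hy, hroots2 aa haa, hroots2 bb hbb]
      exact hcont (pvUnion p2 aa bb) (pvRelabel comp (pvCget comp aa) (pvCget comp bb))
        (by rw [hulen, hlen2]) (by unfold pvRelabel; rw [List.length_map, hclen]) huwf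
        (fun x y hx hy => by
          have hxc : pvInR comp.length x := by rwa [hclen]
          have hyc : pvInR comp.length y := by rwa [hclen]
          rw [huroots' x hx, huroots' y hy, pvCget_relabel comp _ _ x hxc,
              pvCget_relabel comp _ _ y hyc, pvMergeIff, pvMergeIff]
          rw [hiff x y hx hy, hiff x aa hx haa, hiff y bb hy hbb, hiff x bb hx hbb,
              hiff y aa hy haa])

-- ---- initial state ----
theorem pvInit_step (L : Nat) (a : Int) (ha : pvInR L a) :
    pvStep ((List.range L).map Int.ofNat) a = a := by
  obtain ⟨h0, h1⟩ := ha
  unfold pvStep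
  rw [PySem.List.pyGetD_eq_getElem _ _ h0 (by simpa using h1)]
  simp only [List.getElem_map, List.getElem_range]
  simpa using Int.toNat_of_nonneg h0

theorem pvInit_len (L : Nat) : ((List.range L).map Int.ofNat).length = L := by
  simp

theorem pvInit_wf (L : Nat) : pvWF ((List.range L).map Int.ofNat) := by
  constructor
  · intro a ha
    rw [pvInit_len] at ha
    rw [pvInit_step L a ha, pvInit_len]
    exact ha
  · intro a ha
    rw [pvInit_len] at ha
    exact ⟨0, show pvStep _ _ = _ from pvInit_step L a ha⟩

theorem pvInit_sim (L : Nat) : pvSim ((List.range L).map Int.ofNat) ((List.range L).map Int.ofNat) := by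
  refine ⟨rfl, pvInit_wf L, ?_⟩
  intro a b ha hb
  rw [pvInit_len] at ha hb
  have hroot : ∀ x : Int, pvInR L x → pvRootOf ((List.range L).map Int.ofNat) x = x := by
    intro x hx
    exact pvRootOf_root _ x (pvInit_wf L) (by rw [pvInit_len]; exact hx)
      (show pvStep _ _ = _ from pvInit_step L x hx)
  have hcg : ∀ x : Int, pvInR L x → pvCget ((List.range L).map Int.ofNat) x = x := by
    intro x hx
    obtain ⟨h0, h1⟩ := hx
    unfold pvCget
    rw [PySem.List.pyGetD_eq_getElem _ _ h0 (by simpa using h1)]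
    simp only [List.getElem_map, List.getElem_range]
    simpa using Int.toNat_of_nonneg h0
  rw [hroot a ha, hroot b hb, hcg a ha, hcg b hb]

-- ===== VERDICT (by name: the statement is the Claim_ definition above) =====

theorem calculate_max_energy_for_first_corridor_spec : Claim_equal_calculate_max_energy_for_first_corridor := by
  intro n m corridors _hdom hpre
  unfold Spec_calculate_max_energy_for_first_corridor
  obtain ⟨hne, hrest⟩ := hpre
  cases corridors with
  | nil => exact absurd rfl hne
  | cons c rest =>
    obtain ⟨a1, b1, e1⟩ := c
    show (if n = 2 ∨ m + 1 = n then (1000000000 : Int)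
        else pvLoopA a1 b1 (PySem.List.sorted rest (fun t => t.2.2) false)
          ((List.range (n + 1).toNat).map Int.ofNat)) =
      (if n = 2 ∨ m + 1 = n then (1000000000 : Int)
        else pvLoopB a1 b1 (PySem.List.sorted rest (fun t => t.2.2) false)
          ((List.range (n + 1).toNat).map Int.ofNat))
    by_cases hg : n = 2 ∨ m + 1 = n
    · rw [if_pos hg, if_pos hg]
    · rw [if_neg hg, if_neg hg]
      by_cases hrnil : rest = []
      · subst hrnil
        rw [(PySem.List.sorted_eq_nil_iff _ _ _).mpr rfl]
        rfl
      · rcases hrest with hg' | htail | ⟨hn0, hbound⟩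
        · exact absurd hg' hg
        · exact absurd (by simpa using htail) hrnil
        · set L := (n + 1).toNat with hL
          have hLI : (L : Int) = n + 1 := by omega
          have hInR : ∀ x : Int, 0 ≤ x → x ≤ n → pvInR ((List.range L).map Int.ofNat).length x := by
            intro x h0 h1
            rw [pvInit_len]
            exact ⟨h0, by omega⟩
          obtain ⟨ha10, ha1n, hb10, hb1n⟩ := hbound (a1, b1, e1) List.mem_cons_self
          apply pvLoop_eq _ _ _ a1 b1 (pvInit_sim L) (hInR a1 ha10 ha1n) (hInR b1 hb10 hb1n)
          intro e he
          have hmem : e ∈ rest := (PySem.List.mem_sorted _ _ _ _).mp he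
          obtain ⟨h1, h2, h3, h4⟩ := hbound e (List.mem_cons_of_mem _ hmem)
          exact ⟨hInR e.1 h1 h2, hInR e.2.1 h3 h4⟩
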